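-- pv_equiv track=rewrite | github.com/sfujiwara/kaggle-santa-2022 | tasks/hpp.py | position_to_config_tr
-- ===== SOURCE A (Python) =====
-- def position_to_config_tr(position):
--     x, y = position[0], position[1]
--     config = [[64, y-64], [-32, 32], [-16, 16], [-8, 8], [-4, 4], [-2, 2], [-1, 1], [-1, 1]]
--
--     for i in range(x):
--         if i % 2 == 0:
--             config[1][0] += 1
--         else:
--             for j in range(2, 8):
--                 if config[j][0] < config[j][1]:
--                     config[j][0] += 1
--                     break
--     else:
--         return [tuple(arm) for arm in config]
-- ===== SOURCE B (Python) =====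
-- def position_to_config_tr(position):
--     x, y = position[0], position[1]
--     e = (x + 1) // 2 if x > 0 else 0   # number of even i in range(x)
--     o = x // 2 if x > 0 else 0         # number of odd i in range(x)
--     config = [(64, y - 64), (-32 + e, 32)]
--     for cap in (16, 8, 4, 2, 1, 1):
--         take = min(o, 2 * cap)
--         config.append((-cap + take, cap))
--         o -= take
--     return config
-- ===== Notes on version B (the rewrite author's own statement) =====
-- stated objective: faster
-- what changed: Replaces the O(x) incremental loop (one counter tick per step with a carry scan over the arms) by a closed form: the even/odd step counts are computed arithmetically and the odd count is distributed over the fixed-capacity arms with min/subtract in one constant-size pass.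
import Mathlib
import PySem

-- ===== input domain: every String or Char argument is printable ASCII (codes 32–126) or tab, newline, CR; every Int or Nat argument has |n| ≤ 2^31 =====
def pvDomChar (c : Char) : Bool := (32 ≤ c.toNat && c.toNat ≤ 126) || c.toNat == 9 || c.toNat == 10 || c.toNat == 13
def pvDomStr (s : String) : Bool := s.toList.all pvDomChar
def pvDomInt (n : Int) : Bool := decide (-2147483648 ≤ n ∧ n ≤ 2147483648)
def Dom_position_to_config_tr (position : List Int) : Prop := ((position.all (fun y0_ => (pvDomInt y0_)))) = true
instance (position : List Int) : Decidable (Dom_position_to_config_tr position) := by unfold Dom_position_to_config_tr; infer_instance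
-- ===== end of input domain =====

-- B replaces A's O(x) counter loop by an O(1) closed form (even/odd counts + capacity distribution).

-- ===== PORT A =====
-- inner 'for j in range(2, 8): if config[j][0] < config[j][1]: config[j][0] += 1; break'
-- (applied to the list of arms 2..7, which is exactly the tail of the config list)
def pvIncFirst : List (Int × Int) → List (Int × Int)
  | [] => []
  | (a, b) :: rest => if a < b then (a + 1, b) :: rest else (a, b) :: pvIncFirst rest

-- one iteration of the outer loop body for index i
def pvAStep (cfg : List (Int × Int)) (i : Int) : List (Int × Int) :=
  if PySem.Int.mod i 2 == 0 then
    match cfg with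
    | c0 :: (a, b) :: rest => c0 :: (a + 1, b) :: rest
    | l => l
  else
    match cfg with
    | c0 :: c1 :: rest => c0 :: c1 :: pvIncFirst rest
    | l => l

def position_to_config_tr (position : List Int) : List (Int × Int) :=
  let x := (PySem.List.pyGet? position 0).getD 0
  let y := (PySem.List.pyGet? position 1).getD 0
  (PySem.List.pyRange 0 x 1).foldl pvAStep
    [(64, y - 64), (-32, 32), (-16, 16), (-8, 8), (-4, 4), (-2, 2), (-1, 1), (-1, 1)]

-- ===== PORT B =====
-- one step of B's loop over the fixed capacities: take = min(o, 2*cap), append, o -= take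
def pvFillStep (p : List (Int × Int) × Int) (cap : Int) : List (Int × Int) × Int :=
  let take := min p.2 (2 * cap)
  (p.1 ++ [(-cap + take, cap)], p.2 - take)

def position_to_config_tr_alt (position : List Int) : List (Int × Int) :=
  let x := (PySem.List.pyGet? position 0).getD 0
  let y := (PySem.List.pyGet? position 1).getD 0
  let e := if x > 0 then PySem.Int.floordiv (x + 1) 2 else 0
  let o := if x > 0 then PySem.Int.floordiv x 2 else 0
  (([16, 8, 4, 2, 1, 1] : List Int).foldl pvFillStep ([(64, y - 64), (-32 + e, 32)], o)).1

-- ===== PRECONDITION & SPEC =====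
-- Pre_ excludes lists of fewer than two elements, on which A raises IndexError at position[0]/position[1].
def Pre_position_to_config_tr (position : List Int) : Prop := 2 ≤ position.length
instance (position : List Int) : Decidable (Pre_position_to_config_tr position) := by
  unfold Pre_position_to_config_tr; infer_instance
def pvWitness_position_to_config_tr : List Int := [5, 3]

def Spec_position_to_config_tr (position : List Int) (out : List (Int × Int)) : Prop := out = position_to_config_tr_alt position
instance (position : List Int) (out : List (Int × Int)) : Decidable (Spec_position_to_config_tr position out) := by unfold Spec_position_to_config_tr; infer_instance

-- ===== CLAIM (what is proved, stated in full; the proofs are below) =====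
def Claim_equal_position_to_config_tr : Prop := ∀ (position : List Int), Dom_position_to_config_tr position → Pre_position_to_config_tr position → Spec_position_to_config_tr position (position_to_config_tr position)

-- ===== LEMMAS AND PROOFS =====

-- closed-form tail of the config: arms with caps cs after o odd ticks have been distributed
def pvFill : List Nat → Nat → List (Int × Int)
  | [], _ => []
  | c :: cs, o => (((min o (2 * c) : Nat) : Int) - c, (c : Int)) :: pvFill cs (o - 2 * c)

lemma pvIncFirst_fill (cs : List Nat) (o : Nat) :
    pvIncFirst (pvFill cs o) = pvFill cs (o + 1) := by
  induction cs generalizing o with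
  | nil => rfl
  | cons c cs ih =>
    simp only [pvFill, pvIncFirst]
    by_cases h : o < 2 * c
    · rw [if_pos (by push_cast; omega)]
      have h1 : ((min o (2 * c) : Nat) : Int) - c + 1 = ((min (o + 1) (2 * c) : Nat) : Int) - c := by
        push_cast; omega
      have h2 : o - 2 * c = o + 1 - 2 * c := by omega
      rw [h1, h2]
    · rw [if_neg (by push_cast; omega)]
      have h1 : (min o (2 * c)) = min (o + 1) (2 * c) := by omega
      have h2 : o + 1 - 2 * c = (o - 2 * c) + 1 := by omega
      rw [h1, h2, ← ih]

def pvCaps : List Nat := [16, 8, 4, 2, 1, 1]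

-- the loop state of A after n iterations
def pvStateAt (y : Int) (n : Nat) : List (Int × Int) :=
  (64, y - 64) :: (-32 + (((n + 1) / 2 : Nat) : Int), 32) :: pvFill pvCaps (n / 2)

lemma pvLoop_eq (y : Int) (n : Nat) :
    (PySem.List.pyRange 0 (n : Int) 1).foldl pvAStep
      [(64, y - 64), (-32, 32), (-16, 16), (-8, 8), (-4, 4), (-2, 2), (-1, 1), (-1, 1)]
      = pvStateAt y n := by
  induction n with
  | zero =>
    simp [PySem.List.pyRange_one_eq_nil, pvStateAt, pvCaps, pvFill]
  | succ n ih =>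
    have hcast : ((n + 1 : Nat) : Int) = (n : Int) + 1 := by push_cast; ring
    rw [hcast, PySem.List.pyRange_one_succ_right (by positivity), List.foldl_append, ih]
    simp only [List.foldl, pvAStep, pvStateAt]
    by_cases h : n % 2 = 0
    · rw [if_pos (by simp; omega)]
      have hA : (-32 + (((n + 1) / 2 : Nat) : Int)) + 1 = -32 + (((n + 1 + 1) / 2 : Nat) : Int) := by
        push_cast; omega
      have hB : n / 2 = (n + 1) / 2 := by omega
      rw [hA, hB]
    · rw [if_neg (by simp; omega)]
      rw [pvIncFirst_fill]
      have hA : n / 2 + 1 = (n + 1) / 2 := by omega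
      have hB : ((n + 1) / 2 : Nat) = (n + 1 + 1) / 2 := by omega
      rw [hA, hB]

-- B's fold over the capacity list builds exactly pvFill
lemma pvFold_fill (cs : List Nat) (acc : List (Int × Int)) (o : Int) (ho : 0 ≤ o) :
    ((cs.map (Nat.cast : Nat → Int)).foldl pvFillStep (acc, o)).1 = acc ++ pvFill cs o.toNat := by
  induction cs generalizing acc o with
  | nil => simp [pvFill]
  | cons c cs ih =>
    simp only [List.map, List.foldl, pvFillStep]
    rw [ih _ _ (by omega)]
    have h1 : (-(c : Int) + min o (2 * c)) = ((min o.toNat (2 * c) : Nat) : Int) - c := by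
      push_cast; omega
    have h2 : (o - min o (2 * (c : Int))).toNat = o.toNat - 2 * c := by omega
    simp [pvFill, h1, h2]

lemma pvCore (x y : Int) :
    (PySem.List.pyRange 0 x 1).foldl pvAStep
      [(64, y - 64), (-32, 32), (-16, 16), (-8, 8), (-4, 4), (-2, 2), (-1, 1), (-1, 1)]
    = (([16, 8, 4, 2, 1, 1] : List Int).foldl pvFillStep
        ([(64, y - 64), (-32 + (if x > 0 then PySem.Int.floordiv (x + 1) 2 else 0), 32)],
         if x > 0 then PySem.Int.floordiv x 2 else 0)).1 := by
  have hcaps : ([16, 8, 4, 2, 1, 1] : List Int) = (pvCaps.map (Nat.cast : Nat → Int)) := by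
    simp [pvCaps]
  by_cases hpos : x > 0
  · have hxn : x = ((x.toNat : Nat) : Int) := by omega
    rw [if_pos hpos, if_pos hpos, hcaps]
    have he : PySem.Int.floordiv (x + 1) 2 = (((x.toNat + 1) / 2 : Nat) : Int) := by
      rw [show x + 1 = ((x.toNat + 1 : Nat) : Int) by omega]
      exact_mod_cast PySem.Int.floordiv_natCast (x.toNat + 1) 2
    have ho : PySem.Int.floordiv x 2 = (((x.toNat / 2 : Nat) : Int)) := by
      rw [hxn]; exact_mod_cast PySem.Int.floordiv_natCast x.toNat 2
    rw [he, ho, pvFold_fill pvCaps _ _ (by positivity)]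
    rw [show x = ((x.toNat : Nat) : Int) from hxn, pvLoop_eq y x.toNat]
    simp only [pvStateAt, List.cons_append, List.nil_append]
    congr 2
  · rw [if_neg hpos, if_neg hpos, hcaps,
      pvFold_fill pvCaps _ 0 le_rfl,
      PySem.List.pyRange_one_eq_nil (by omega)]
    simp [pvCaps, pvFill]

lemma pvPorts_agree (position : List Int) :
    position_to_config_tr position = position_to_config_tr_alt position := by
  simp only [position_to_config_tr, position_to_config_tr_alt]
  exact pvCore _ _

-- ===== VERDICT (by name: the statement is the Claim_ definition above) =====
theorem position_to_config_tr_spec : Claim_equal_position_to_config_tr := by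
  intro position _ _
  unfold Spec_position_to_config_tr
  exact pvPorts_agree position
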